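-- pv_equiv track=rewrite | github.com/pcseai25/P10 | funcs.py | open_folder
-- ===== SOURCE A (Python) =====
-- def open_folder(sentence):
--     # Disc name keywords
--     disc_keywords = ["disc", "disk"]
--
--     # Extracting disc name and folder name
--     disc_name = None
--     folder_name = None
--     words = sentence.split()
--     for i in range(len(words)):
--         if words[i] in disc_keywords and i+1 < len(words):
--             disc_name = words[i+1]
--         elif words[i] == "folder" and i+1 < len(words):
--             folder_name = words[i+1]
--     return [disc_name,folder_name]
-- ===== SOURCE B (Python) =====
-- def open_folder(sentence):
--     # Reverse scan with early exit: first match from the end = last overwrite of A's forward loop.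
--     disc_keywords = ["disc", "disk"]
--     words = sentence.split()
--     disc_name = None
--     folder_name = None
--     for i in range(len(words) - 2, -1, -1):
--         w = words[i]
--         if disc_name is None and w in disc_keywords:
--             disc_name = words[i + 1]
--         if folder_name is None and w == "folder":
--             folder_name = words[i + 1]
--         if disc_name is not None and folder_name is not None:
--             break
--     return [disc_name, folder_name]
-- ===== Notes on version B (the rewrite author's own statement) =====
-- stated objective: alternative
-- what changed: B scans the words backward keeping the first match (equal to A's forward keep-last-overwrite scan) and breaks early once both disc and folder names are found.
import Mathlib
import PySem

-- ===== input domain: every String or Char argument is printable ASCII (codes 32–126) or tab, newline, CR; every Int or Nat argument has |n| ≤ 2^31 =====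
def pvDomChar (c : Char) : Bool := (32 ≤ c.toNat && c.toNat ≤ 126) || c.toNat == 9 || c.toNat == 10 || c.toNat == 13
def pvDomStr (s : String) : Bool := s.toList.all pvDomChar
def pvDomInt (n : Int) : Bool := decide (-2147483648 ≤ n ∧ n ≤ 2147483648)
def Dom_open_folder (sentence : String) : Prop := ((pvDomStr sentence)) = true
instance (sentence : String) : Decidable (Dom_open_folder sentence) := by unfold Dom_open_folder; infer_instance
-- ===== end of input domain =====

-- B replaces A's forward keep-last-match loop by a backward keep-first-match scan with early exit
-- once both names are found (objective: alternative control shape; same asymptotic cost).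

-- ===== PORT A =====
-- one step of A's forward loop at index i (words[i] is always in range since i ∈ range(len(words)))
def stepA (words : List String) (n : Nat) (st : Option String × Option String) (i : Nat) :
    Option String × Option String :=
  if words.getD i "" ∈ ["disc", "disk"] ∧ i + 1 < n then
    (some (words.getD (i + 1) ""), st.2)
  else if words.getD i "" = "folder" ∧ i + 1 < n then
    (st.1, some (words.getD (i + 1) ""))
  else st

def open_folder (sentence : String) : List (Option String) :=
  let words := PySem.Str.split₀ sentence
  let res := (List.range words.length).foldl (stepA words words.length) (none, none)
  [res.1, res.2]

-- ===== PORT B =====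
-- B's loop: `goB words k d f` runs the indices k-1, k-2, …, 0 (i.e. range(k-1, -1, -1)),
-- keeping the first match found and breaking once both names are known.
def goB (words : List String) : Nat → Option String → Option String → Option String × Option String
  | 0, d, f => (d, f)
  | k + 1, d, f =>
    let w := words.getD k ""
    let d' := if d = none ∧ w ∈ ["disc", "disk"] then some (words.getD (k + 1) "") else d
    let f' := if f = none ∧ w = "folder" then some (words.getD (k + 1) "") else f
    if d' ≠ none ∧ f' ≠ none then (d', f') else goB words k d' f'

def open_folder_alt (sentence : String) : List (Option String) :=
  let words := PySem.Str.split₀ sentence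
  let res := goB words (words.length - 1) none none
  [res.1, res.2]

-- ===== PRECONDITION & SPEC =====
def Spec_open_folder (sentence : String) (out : List (Option String)) : Prop := out = open_folder_alt sentence
instance (sentence : String) (out : List (Option String)) : Decidable (Spec_open_folder sentence out) := by unfold Spec_open_folder; infer_instance

-- ===== CLAIM (what is proved, stated in full; the proofs are below) =====
def Claim_equal_open_folder : Prop := ∀ (sentence : String), Dom_open_folder sentence → Spec_open_folder sentence (open_folder sentence)

-- ===== LEMMAS AND PROOFS =====

-- A's fold restricted to the first m indices
def foldA (words : List String) (m : Nat) : Option String × Option String :=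
  (List.range m).foldl (stepA words words.length) (none, none)

lemma foldA_succ (words : List String) (m : Nat) :
    foldA words (m + 1) = stepA words words.length (foldA words m) m := by
  simp [foldA, List.range_succ]

-- key invariant: the backward keep-first scan below index m, started with accumulators d f,
-- equals "d (resp. f) if already set, else the last match of A's forward fold over range m"
lemma goB_eq_foldA (words : List String) :
    ∀ (m : Nat), m ≤ words.length - 1 → ∀ d f,
      goB words m d f = (d.or (foldA words m).1, f.or (foldA words m).2) := by
  intro m
  induction m with
  | zero => intro _ d f; simp [goB, foldA]
  | succ k ih =>
    intro hm d f
    have hk := ih (by omega : k ≤ words.length - 1)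
    have hlt : k + 1 < words.length := by omega
    rw [foldA_succ, goB]
    by_cases hw : words.getD k "" ∈ ["disc", "disk"] <;>
      by_cases hwf : words.getD k "" = "folder" <;>
      cases d <;> cases f <;>
      simp_all [stepA, Option.or]

-- A's step at the last index does nothing (i + 1 < n fails there)
lemma foldA_full (words : List String) :
    foldA words words.length = foldA words (words.length - 1) := by
  cases h : words.length with
  | zero => rfl
  | succ k =>
    have h1 : k + 1 - 1 = k := rfl
    rw [h1, foldA_succ]
    simp [stepA, h]

-- ===== VERDICT (by name: the statement is the Claim_ definition above) =====
theorem open_folder_spec : Claim_equal_open_folder := by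
  intro sentence _
  unfold Spec_open_folder open_folder open_folder_alt
  simp only []
  rw [goB_eq_foldA _ _ (le_refl _)]
  rw [show ((List.range (PySem.Str.split₀ sentence).length).foldl
        (stepA (PySem.Str.split₀ sentence) (PySem.Str.split₀ sentence).length) (none, none))
      = foldA (PySem.Str.split₀ sentence) (PySem.Str.split₀ sentence).length from rfl]
  rw [foldA_full]
  simp [Option.or]
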